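-- pv_equiv track=rewrite | github.com/Sparrow-2/SDR-FM-RDS-Transmitter | rds_encoder_simplified.py | calc_syndrome
-- ===== SOURCE A (Python) =====
-- def calc_syndrome(message, mlen):
--     """
--     Calculates the 10-bit checkword (CRC/Syndrome) using standard RDS generator polynomial.
--     Generator Polynomial: g(x) = x^10 + x^8 + x^7 + x^5 + x^4 + x^3 + 1 (0x5B9)
--     """
--     reg = 0
--     poly = 0x5B9
--     plen = 10
--     # Polynomial division algorithm
--     for i in range(mlen, 0, -1):
--         reg = (reg << 1) | ((message >> (i - 1)) & 0x01)
--         if (reg & (1 << plen)):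
--             reg = reg ^ poly
--     for i in range(plen, 0, -1):
--         reg = reg << 1
--         if (reg & (1 << plen)):
--             reg = reg ^ poly
--     return reg & ((1 << plen) - 1)
-- ===== SOURCE B (Python) =====
-- def calc_syndrome(message, mlen):
--     """
--     Table-driven GF(2)-linear computation of the 10-bit RDS checkword:
--     the CRC is linear over GF(2), so XOR together the precomputed
--     remainder of each set message bit (bit p contributes x^(p+10) mod g).
--     """
--     poly = 0x5B9
--     r = 1
--     for _ in range(10):
--         r <<= 1
--         if r & 0x400:
--             r ^= poly
--     acc = 0
--     for p in range(mlen):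
--         if (message >> p) & 1:
--             acc ^= r
--         r <<= 1
--         if r & 0x400:
--             r ^= poly
--     return acc
-- ===== Notes on version B (the rewrite author's own statement) =====
-- stated objective: alternative
-- what changed: Replaces the bit-serial shift-register CRC division (MSB-first over the message plus 10 augmentation shifts) with a GF(2)-linear computation: the per-bit remainders x^(p+10) mod g are generated LSB-first and the checkword is the XOR of the remainders of the set message bits, with no augmentation pass and no final mask needed.
import Mathlib
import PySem

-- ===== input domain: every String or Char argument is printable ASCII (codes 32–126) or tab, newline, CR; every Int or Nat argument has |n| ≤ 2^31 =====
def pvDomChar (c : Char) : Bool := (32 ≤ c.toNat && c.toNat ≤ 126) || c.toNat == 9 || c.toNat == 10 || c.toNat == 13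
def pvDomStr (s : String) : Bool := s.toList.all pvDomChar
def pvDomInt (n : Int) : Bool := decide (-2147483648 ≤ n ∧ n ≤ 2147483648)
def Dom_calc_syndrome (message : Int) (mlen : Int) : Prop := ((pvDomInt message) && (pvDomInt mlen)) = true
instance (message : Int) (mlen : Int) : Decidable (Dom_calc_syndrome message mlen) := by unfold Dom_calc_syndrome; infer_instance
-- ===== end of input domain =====

-- B replaces A's MSB-first CRC shift register (message pass plus 10 augmentation shifts and a final
-- mask) by a GF(2)-linear alternative of the same cost: generate the per-bit remainders LSB-first
-- and XOR the remainders of the set message bits.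


-- ===== PORT A =====
-- body of A's first loop: reg = (reg << 1) | ((message >> (i-1)) & 1); reduce (poly = 0x5B9, plen = 10)
-- (i ≥ 1 for every i the loop visits, so `(i - 1).toNat` is exact for Python's `>> (i-1)`)
def pvAStep (message : Int) (reg : Int) (i : Int) : Int :=
  let reg := PySem.Int.bor (reg <<< (1 : Nat)) (PySem.Int.band (message >>> (i - 1).toNat) 0x01)
  if PySem.Int.band reg ((1 : Int) <<< (10 : Nat)) ≠ 0 then PySem.Int.bxor reg 0x5B9 else reg

-- body of A's second loop: reg = reg << 1; reduce
def pvAShift (reg : Int) (_i : Int) : Int :=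
  let reg := reg <<< (1 : Nat)
  if PySem.Int.band reg ((1 : Int) <<< (10 : Nat)) ≠ 0 then PySem.Int.bxor reg 0x5B9 else reg

def calc_syndrome (message : Int) (mlen : Int) : Int :=
  let reg : Int := (PySem.List.pyRange mlen 0 (-1)).foldl (pvAStep message) 0
  let reg : Int := (PySem.List.pyRange 10 0 (-1)).foldl pvAShift reg
  PySem.Int.band reg (((1 : Int) <<< (10 : Nat)) - 1)

-- ===== PORT B =====
-- body of B's table loop: r <<= 1; if r & 0x400: r ^= poly
def pvBTab (r : Int) (_i : Int) : Int :=
  let r := r <<< (1 : Nat)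
  if PySem.Int.band r 0x400 ≠ 0 then PySem.Int.bxor r 0x5B9 else r

-- body of B's message loop over state (acc, r)   (p ≥ 0 in the loop, so `p.toNat` is exact)
def pvBStep (message : Int) (st : Int × Int) (p : Int) : Int × Int :=
  let acc := if PySem.Int.band (message >>> p.toNat) 1 ≠ 0 then PySem.Int.bxor st.1 st.2 else st.1
  let r := st.2 <<< (1 : Nat)
  let r := if PySem.Int.band r 0x400 ≠ 0 then PySem.Int.bxor r 0x5B9 else r
  (acc, r)

def calc_syndrome_alt (message : Int) (mlen : Int) : Int :=
  let r : Int := (PySem.List.pyRange 0 10 1).foldl pvBTab 1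
  ((PySem.List.pyRange 0 mlen 1).foldl (pvBStep message) (0, r)).1

-- ===== PRECONDITION & SPEC =====
def Spec_calc_syndrome (message : Int) (mlen : Int) (out : Int) : Prop := out = calc_syndrome_alt message mlen
instance (message : Int) (mlen : Int) (out : Int) : Decidable (Spec_calc_syndrome message mlen out) := by unfold Spec_calc_syndrome; infer_instance

-- ===== CLAIM (what is proved, stated in full; the proofs are below) =====
def Claim_equal_calc_syndrome : Prop := ∀ (message : Int) (mlen : Int), Dom_calc_syndrome message mlen → Spec_calc_syndrome message mlen (calc_syndrome message mlen)

-- ===== LEMMAS AND PROOFS =====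

-- Nat-level model of the shared shift-register step
def pvRed (u : Nat) : Nat := if u &&& 1024 ≠ 0 then u ^^^ 1465 else u
def pvStep0 (u : Nat) : Nat := pvRed (u <<< 1)
def pvStep (u b : Nat) : Nat := pvRed ((u <<< 1) ||| b)
def pvBit (m : Int) (p : Nat) : Nat := (PySem.Int.mod (m >>> p) 2).toNat
def pvS : Nat → Nat → Nat
  | 0, u => u
  | k + 1, u => pvS k (pvStep0 u)
def pvA (m : Int) : Nat → Nat → Nat
  | 0, r => r
  | n + 1, r => pvA m n (pvStep r (pvBit m n))
def pvB (m : Int) : Nat → Nat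
  | 0 => 0
  | n + 1 => pvB m n ^^^ (if pvBit m n = 1 then pvS (10 + n) 1 else 0)

lemma pvBit_lt_two (m : Int) (p : Nat) : pvBit m p < 2 := by
  have h0 := PySem.Int.mod_nonneg (m >>> p) (b := 2) (by norm_num)
  have h1 := PySem.Int.mod_lt (m >>> p) (b := 2) (by norm_num)
  unfold pvBit; omega

lemma pvBit_cast (m : Int) (p : Nat) :
    ((pvBit m p : Nat) : Int) = PySem.Int.band (m >>> p) 1 := by
  rw [PySem.Int.band_one, pvBit,
    Int.toNat_of_nonneg (PySem.Int.mod_nonneg (m >>> p) (by norm_num))]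

lemma pvRed_xor (u v : Nat) : pvRed (u ^^^ v) = pvRed u ^^^ pvRed v := by
  unfold pvRed
  have h : (u ^^^ v) &&& 1024 = (u &&& 1024) ^^^ (v &&& 1024) := Nat.and_xor_distrib_right
  have hu : u &&& 1024 = (u.testBit 10).toNat * 1024 := by
    have := Nat.and_two_pow u 10; norm_num at this; omega
  have hv : v &&& 1024 = (v.testBit 10).toNat * 1024 := by
    have := Nat.and_two_pow v 10; norm_num at this; omega
  have key : ∀ a b : Nat, (a ^^^ 1465) ^^^ (b ^^^ 1465) = a ^^^ b := by
    intro a b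
    apply Nat.eq_of_testBit_eq; intro i
    simp only [Nat.testBit_xor]
    cases a.testBit i <;> cases b.testBit i <;> cases Nat.testBit 1465 i <;> rfl
  cases hbu : u.testBit 10 <;> cases hbv : v.testBit 10 <;>
    simp [hbu, hbv, h, hu, hv, key, Nat.xor_assoc, Nat.xor_comm, Nat.xor_left_comm]

lemma pvShift_or (u b : Nat) (hb : b < 2) : (u <<< 1) ||| b = (u <<< 1) ^^^ b := by
  interval_cases b
  · simp
  · apply Nat.eq_of_testBit_eq; intro i
    cases i with
    | zero => simp [Nat.shiftLeft_eq]
    | succ j =>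
        have h1 : Nat.testBit 1 (j + 1) = false := by simp [Nat.testBit_succ]
        simp [Nat.testBit_or, Nat.testBit_xor, h1]

lemma pvRed_small (b : Nat) (hb : b < 2) : pvRed b = b := by
  interval_cases b <;> rfl

lemma pvStep0_xor (x y : Nat) : pvStep0 (x ^^^ y) = pvStep0 x ^^^ pvStep0 y := by
  unfold pvStep0
  rw [Nat.shiftLeft_xor_distrib, pvRed_xor]

lemma pvStep_eq (x b : Nat) (hb : b < 2) : pvStep x b = pvStep0 x ^^^ b := by
  unfold pvStep pvStep0
  rw [pvShift_or x b hb, pvRed_xor, pvRed_small b hb]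

lemma pvS_xor (k : Nat) : ∀ x y, pvS k (x ^^^ y) = pvS k x ^^^ pvS k y := by
  induction k with
  | zero => intro x y; rfl
  | succ k ih => intro x y; simp only [pvS, pvStep0_xor]; exact ih _ _

lemma pvStep0_zero : pvStep0 0 = 0 := rfl

lemma pvS_zero (k : Nat) : pvS k 0 = 0 := by
  induction k with
  | zero => rfl
  | succ k ih => simpa [pvS, pvStep0_zero] using ih

lemma pvS_step0_comm (k : Nat) : ∀ u, pvS k (pvStep0 u) = pvStep0 (pvS k u) := by
  induction k with
  | zero => intro u; rfl
  | succ k ih => intro u; simp only [pvS]; exact ih _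

-- the heart: running the register over bits (n-1 … 0) from r equals the homogeneous run XOR B's table sum
lemma pvMain (m : Int) : ∀ (n : Nat) (r : Nat),
    pvS 10 (pvA m n r) = pvS (10 + n) r ^^^ pvB m n := by
  intro n
  induction n with
  | zero => intro r; simp [pvA, pvB]
  | succ n ih =>
      intro r
      have hb := pvBit_lt_two m n
      simp only [pvA, pvB]
      rw [ih, pvStep_eq r _ hb, pvS_xor]
      have hs : pvS (10 + n) (pvStep0 r) = pvS (10 + (n + 1)) r := by
        rw [show 10 + (n + 1) = (10 + n) + 1 from by omega]; rfl
      have hbs : pvS (10 + n) (pvBit m n) = if pvBit m n = 1 then pvS (10 + n) 1 else 0 := by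
        have h01 : pvBit m n = 0 ∨ pvBit m n = 1 := by omega
        rcases h01 with h | h <;> simp [h, pvS_zero]
      rw [hs, hbs]
      simp [Nat.xor_comm, Nat.xor_left_comm]

set_option maxRecDepth 100000 in
lemma pvRed_lt : ∀ u : Nat, u < 2048 → pvRed u < 1024 := by decide

lemma pvStep0_lt (u : Nat) (h : u < 1024) : pvStep0 u < 1024 := by
  apply pvRed_lt
  rw [Nat.shiftLeft_eq]; omega

lemma pvS_lt (k : Nat) : ∀ u, u < 1024 → pvS k u < 1024 := by
  induction k with
  | zero => intro u h; exact h
  | succ k ih => intro u h; exact ih _ (pvStep0_lt u h)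

lemma pvB_lt (m : Int) (n : Nat) : pvB m n < 1024 := by
  induction n with
  | zero => norm_num [pvB]
  | succ n ih =>
      have h2 : (1024 : Nat) = 2 ^ 10 := by norm_num
      simp only [pvB]
      rw [h2] at ih ⊢
      apply Nat.xor_lt_two_pow ih
      split
      · rw [← h2]; exact pvS_lt _ 1 (by norm_num)
      · positivity

-- casts: the Int loop bodies compute the Nat model
lemma pvAStep_cast (m : Int) (x n : Nat) :
    pvAStep m (x : Int) ((n : Int) + 1) = ((pvStep x (pvBit m n) : Nat) : Int) := by
  simp only [pvAStep, pvStep, pvRed]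
  have e1 : ((n : Int) + 1 - 1).toNat = n := by simp
  rw [e1, ← pvBit_cast, ← Int.natCast_shiftLeft, PySem.Int.bor_natCast]
  have h1024 : ((1 : Int) <<< (10 : Nat)) = ((1024 : Nat) : Int) := by
    norm_num [Int.shiftLeft_eq]
  have hpoly : (0x5B9 : Int) = ((1465 : Nat) : Int) := by norm_num
  rw [h1024, PySem.Int.band_natCast, hpoly, PySem.Int.bxor_natCast]
  by_cases hc : ((x <<< 1) ||| pvBit m n) &&& 1024 = 0 <;> simp [hc]

lemma pvAShift_cast (x : Nat) (i : Int) :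
    pvAShift (x : Int) i = ((pvStep0 x : Nat) : Int) := by
  simp only [pvAShift, pvStep0, pvRed]
  rw [← Int.natCast_shiftLeft]
  have h1024 : ((1 : Int) <<< (10 : Nat)) = ((1024 : Nat) : Int) := by
    norm_num [Int.shiftLeft_eq]
  have hpoly : (0x5B9 : Int) = ((1465 : Nat) : Int) := by norm_num
  rw [h1024, PySem.Int.band_natCast, hpoly, PySem.Int.bxor_natCast]
  by_cases hc : (x <<< 1) &&& 1024 = 0 <;> simp [hc]

lemma loopA (m : Int) : ∀ (n : Nat) (x : Nat),
    (PySem.List.pyRange (n : Int) 0 (-1)).foldl (pvAStep m) (x : Int) = ((pvA m n x : Nat) : Int) := by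
  intro n
  induction n with
  | zero =>
      intro x
      rw [show ((0 : Nat) : Int) = (0 : Int) from rfl, PySem.List.pyRange_neg_one_eq_nil le_rfl]
      rfl
  | succ n ih =>
      intro x
      rw [PySem.List.pyRange_neg_one_cons (by exact_mod_cast Nat.succ_pos n), List.foldl_cons]
      have h2 : ((n + 1 : Nat) : Int) = (n : Int) + 1 := by push_cast; ring
      rw [h2, pvAStep_cast]
      have h3 : ((n : Int) + 1) - 1 = (n : Int) := by ring
      rw [h3]
      exact ih _

lemma loopShift : ∀ (l : List Int) (x : Nat),
    l.foldl pvAShift (x : Int) = ((pvS l.length x : Nat) : Int) := by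
  intro l
  induction l with
  | nil => intro x; rfl
  | cons a l ih => intro x; rw [List.foldl_cons, pvAShift_cast]; exact ih _

lemma pvBStep_cast (m : Int) (a r : Nat) (n : Nat) :
    pvBStep m ((a : Int), (r : Int)) ((n : Nat) : Int)
      = (((a ^^^ (if pvBit m n = 1 then r else 0) : Nat) : Int), ((pvStep0 r : Nat) : Int)) := by
  have hsh : ((r : Int) <<< (1 : Nat)) = ((r <<< 1 : Nat) : Int) := (Int.natCast_shiftLeft r 1).symm
  have hcond2 : PySem.Int.band (((r <<< 1 : Nat)) : Int) 0x400 = (((r <<< 1) &&& 1024 : Nat) : Int) := by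
    rw [show (0x400 : Int) = ((1024 : Nat) : Int) from rfl, PySem.Int.band_natCast]
  have hx2 : PySem.Int.bxor (((r <<< 1 : Nat)) : Int) 0x5B9 = (((r <<< 1) ^^^ 1465 : Nat) : Int) := by
    rw [show (0x5B9 : Int) = ((1465 : Nat) : Int) from rfl, PySem.Int.bxor_natCast]
  have hx1 : PySem.Int.bxor ((a : Nat) : Int) ((r : Nat) : Int) = ((a ^^^ r : Nat) : Int) :=
    PySem.Int.bxor_natCast a r
  simp only [pvBStep, Int.toNat_natCast]
  rw [← pvBit_cast m n, hsh, hcond2, hx2, hx1]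
  unfold pvStep0 pvRed
  rcases (by have := pvBit_lt_two m n; omega : pvBit m n = 0 ∨ pvBit m n = 1) with h | h <;>
    by_cases hc : (r <<< 1) &&& 1024 = 0 <;>
      simp [h, hc]

lemma loopA0 (m : Int) (n : Nat) :
    (PySem.List.pyRange (n : Int) 0 (-1)).foldl (pvAStep m) 0 = ((pvA m n 0 : Nat) : Int) := by
  simpa using loopA m n 0

lemma loopShift0 (l : List Int) :
    l.foldl pvAShift (0 : Int) = ((pvS l.length 0 : Nat) : Int) := by
  simpa using loopShift l 0

lemma loopB (m : Int) : ∀ (n : Nat),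
    (PySem.List.pyRange 0 (n : Int) 1).foldl (pvBStep m) ((0 : Int), ((pvS 10 1 : Nat) : Int))
      = (((pvB m n : Nat) : Int), ((pvS (10 + n) 1 : Nat) : Int)) := by
  intro n
  induction n with
  | zero =>
      rw [show ((0 : Nat) : Int) = (0 : Int) from rfl, PySem.List.pyRange_one_eq_nil le_rfl]
      norm_num [pvB]
  | succ n ih =>
      rw [show ((n + 1 : Nat) : Int) = ((n : Nat) : Int) + 1 from by push_cast; ring,
        PySem.List.pyRange_one_succ_right (by positivity)]
      simp only [List.foldl_append, List.foldl_cons, List.foldl_nil]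
      rw [ih, pvBStep_cast]
      have h2 : pvStep0 (pvS (10 + n) 1) = pvS (10 + (n + 1)) 1 := by
        rw [show 10 + (n + 1) = (10 + n) + 1 from by omega]
        exact (pvS_step0_comm (10 + n) 1).symm
      rw [h2]
      rfl

-- ===== VERDICT (by name: the statement is the Claim_ definition above) =====
theorem calc_syndrome_spec : Claim_equal_calc_syndrome := by
  intro message mlen _
  unfold Spec_calc_syndrome
  simp only [calc_syndrome, calc_syndrome_alt]
  have hr : (PySem.List.pyRange 0 10 1).foldl pvBTab 1 = ((pvS 10 1 : Nat) : Int) := by decide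
  have hmask : ((1 : Int) <<< (10 : Nat)) - 1 = ((1023 : Nat) : Int) := by
    norm_num [Int.shiftLeft_eq]
  have hlen : (PySem.List.pyRange 10 0 (-1)).length = 10 := by decide
  rw [hr]
  rcases (by omega : mlen ≤ 0 ∨ 0 < mlen) with h | h
  · rw [PySem.List.pyRange_neg_one_eq_nil h, PySem.List.pyRange_one_eq_nil h]
    simp only [List.foldl_nil]
    rw [loopShift0, hlen, pvS_zero, hmask, PySem.Int.band_natCast]
    simp
  · have hn : mlen = ((mlen.toNat : Nat) : Int) := (Int.toNat_of_nonneg h.le).symm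
    rw [hn, loopA0, loopShift, hlen, loopB, hmask, PySem.Int.band_natCast]
    have hkey : pvS 10 (pvA message mlen.toNat 0) &&& 1023 = pvB message mlen.toNat := by
      rw [pvMain message mlen.toNat 0, pvS_zero, Nat.zero_xor,
        show (1023 : Nat) = 2 ^ 10 - 1 from by norm_num, Nat.and_two_pow_sub_one_eq_mod]
      exact Nat.mod_eq_of_lt (by have := pvB_lt message mlen.toNat; norm_num; omega)
    rw [hkey]
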